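-- pv_equiv track=rewrite | github.com/tmarques82/Algorithms-course-exercises | minimum_cuts.py | process_graph_matrix
-- ===== SOURCE A (Python) =====
-- def process_graph_matrix(graph_matrix):
--     vertices = {}
--     edges = {}
--     edge_number = 1
--     for inp in graph_matrix:
--         vertex = inp[0]
--         for i in range(1, len(inp)):
--             second_vertex = inp[i]
--             if second_vertex > vertex:
--                 #only compute one direction
--                 edges[edge_number] = [vertex, second_vertex]
--                 if not vertices.get(vertex):
--                     vertices[vertex] = set([])
--                 vertices[vertex].add(edge_number)
--                 if not vertices.get(second_vertex):
--                     vertices[second_vertex] = set([])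
--                 vertices[second_vertex].add(edge_number)
--                 edge_number += 1
--     return vertices, edges
-- ===== SOURCE B (Python) =====
-- def process_graph_matrix(graph_matrix):
--     # numbered edge list, each row numbered from its own offset
--     items = []
--     base = 1
--     for row in graph_matrix:
--         v = row[0]
--         hits = [x for x in row[1:] if x > v]
--         items.extend((n, [v, w]) for n, w in enumerate(hits, base))
--         base += len(hits)
--     edges = dict(items)
--     # vertices in first-occurrence order, each mapped to the numbers of its incident edges
--     order = list(dict.fromkeys(v for _, e in items for v in e))
--     vertices = {v: {n for n, e in items if v in e} for v in order}
--     return vertices, edges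
-- ===== Notes on version B (the rewrite author's own statement) =====
-- stated objective: alternative
-- what changed: A interleaves everything in one stateful nested loop (running edge counter, mutable vertex sets updated per edge); B instead numbers each row's qualifying pairs from a per-row offset into a flat (number, [v, w]) item list, converts that list to the edges dict wholesale with dict(items), and defines vertices declaratively: for each vertex in first-occurrence order (dict.fromkeys) a set comprehension filters the edge list for the numbers of its incident edges -- no incremental incidence state at all, trading time (O(V*E) for the vertex map) for a specification-like construction.
import Mathlib
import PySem

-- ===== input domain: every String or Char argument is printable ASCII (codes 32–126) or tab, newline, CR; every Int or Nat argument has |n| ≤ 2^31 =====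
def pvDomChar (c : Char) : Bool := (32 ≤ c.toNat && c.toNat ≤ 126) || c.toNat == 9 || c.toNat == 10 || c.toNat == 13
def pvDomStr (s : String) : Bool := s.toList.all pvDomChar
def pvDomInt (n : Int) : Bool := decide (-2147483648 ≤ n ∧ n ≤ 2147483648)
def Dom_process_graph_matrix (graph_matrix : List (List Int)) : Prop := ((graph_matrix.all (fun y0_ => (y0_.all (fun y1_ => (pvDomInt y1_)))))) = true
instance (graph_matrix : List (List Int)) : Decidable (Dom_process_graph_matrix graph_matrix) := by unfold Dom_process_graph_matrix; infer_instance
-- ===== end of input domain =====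

-- B replaces A's single stateful nested loop by per-row offset numbering of the edge items and a
-- declarative vertex map (a filter of the edge list per vertex, in first-occurrence order); same
-- return value, different construction (objective: alternative).

-- ===== PORT A =====
-- literal transliteration of A; inp[0]/inp[i] use pyGetD (in range for i ∈ range(1, len); inp[0] is
-- out of range exactly on an empty row, where Python A raises — excluded by Pre_ below);
-- 'not vertices.get(v)' is '(get? v).getD ∅ = ∅' (falsy = absent or empty set; stored sets are never empty);
-- 'vertices[v].add(n)' is 'modify v ∅ (·.add n)' (the key is always present there).
def process_graph_matrix (graph_matrix : List (List Int)) : (List (Int × List Int)) × (List (Int × List Int)) :=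
  let st := graph_matrix.foldl (fun st inp =>
    let vertex := PySem.List.pyGetD inp 0 0
    (PySem.List.pyRange 1 (PySem.List.len inp) 1).foldl (fun st i =>
      let second_vertex := PySem.List.pyGetD inp i 0
      if second_vertex > vertex then
        let n := st.2.2
        let es := (st.2.1).insert n [vertex, second_vertex]
        let vs := st.1
        let vs := if (vs.get? vertex).getD PySem.Set.empty = PySem.Set.empty then vs.insert vertex PySem.Set.empty else vs
        let vs := vs.modify vertex PySem.Set.empty (fun s => PySem.Set.add s n)
        let vs := if (vs.get? second_vertex).getD PySem.Set.empty = PySem.Set.empty then vs.insert second_vertex PySem.Set.empty else vs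
        let vs := vs.modify second_vertex PySem.Set.empty (fun s => PySem.Set.add s n)
        (vs, es, n + 1)
      else st) st)
    (((PySem.Dict.empty : PySem.Dict Int (PySem.Set Int)), (PySem.Dict.empty : PySem.Dict Int (List Int)), (1 : Int)))
  (st.1.items, st.2.1.items)

-- ===== PORT B =====
-- literal transliteration of Source B: items loop (row[0] via pyGetD — out of range exactly on an empty
-- row, where Python B raises too, excluded by Pre_; row[1:] is slice; enumerate(hits, base)),
-- edges = dict(items) as a fold of inserts, order = dict.fromkeys is PySem.List.dedup, and the
-- vertices comprehension as a fold of inserts of filtered edge-number sets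
def process_graph_matrix_alt (graph_matrix : List (List Int)) : (List (Int × List Int)) × (List (Int × List Int)) :=
  let ib := graph_matrix.foldl (fun (ib : List (Int × List Int) × Int) row =>
      let v := PySem.List.pyGetD row 0 0
      let hits := (PySem.List.slice row (some 1) none).filter (fun x => x > v)
      (ib.1 ++ (PySem.List.enumerate hits ib.2).map (fun nw => (nw.1, [v, nw.2])),
       ib.2 + (hits.length : Int)))
    (([] : List (Int × List Int)), (1 : Int))
  let items := ib.1
  let edges := items.foldl (fun (d : PySem.Dict Int (List Int)) p => d.insert p.1 p.2)
    (PySem.Dict.empty : PySem.Dict Int (List Int))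
  let order := PySem.List.dedup (items.flatMap (fun p => p.2))
  let vertices := order.foldl (fun (d : PySem.Dict Int (PySem.Set Int)) v =>
      d.insert v (PySem.Set.ofList ((items.filter (fun p => decide (v ∈ p.2))).map (fun p => p.1))))
    (PySem.Dict.empty : PySem.Dict Int (PySem.Set Int))
  (vertices.items, edges.items)

-- ===== PRECONDITION & SPEC =====
-- Pre_ excludes exactly the matrices with an empty row: there Python A raises IndexError at inp[0].
def Pre_process_graph_matrix (graph_matrix : List (List Int)) : Prop :=
  ∀ row ∈ graph_matrix, row ≠ []
instance (graph_matrix : List (List Int)) : Decidable (Pre_process_graph_matrix graph_matrix) := by unfold Pre_process_graph_matrix; infer_instance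
def pvWitness_process_graph_matrix : List (List Int) := [[1, 2, 3], [2, 1, 3], [3, 1, 2]]

def Spec_process_graph_matrix (graph_matrix : List (List Int)) (out : (List (Int × List Int)) × (List (Int × List Int))) : Prop := out = process_graph_matrix_alt graph_matrix
instance (graph_matrix : List (List Int)) (out : (List (Int × List Int)) × (List (Int × List Int))) : Decidable (Spec_process_graph_matrix graph_matrix out) := by unfold Spec_process_graph_matrix; infer_instance

-- ===== CLAIM (what is proved, stated in full; the proofs are below) =====
def Claim_equal_process_graph_matrix : Prop := ∀ (graph_matrix : List (List Int)), Dom_process_graph_matrix graph_matrix → Pre_process_graph_matrix graph_matrix → Spec_process_graph_matrix graph_matrix (process_graph_matrix graph_matrix)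

-- ===== LEMMAS AND PROOFS =====

-- A's per-vertex update (get-falsy check, insert, modify) as a function
def vstepA (n a : Int) (v : PySem.Dict Int (PySem.Set Int)) : PySem.Dict Int (PySem.Set Int) :=
  let v1 := if (v.get? a).getD PySem.Set.empty = PySem.Set.empty then v.insert a PySem.Set.empty else v
  v1.modify a PySem.Set.empty (fun s => PySem.Set.add s n)

-- the same update rewritten with setdefault (the shared reference point of both proofs)
def vstepB (n a : Int) (v : PySem.Dict Int (PySem.Set Int)) : PySem.Dict Int (PySem.Set Int) :=
  (v.setdefault a PySem.Set.empty).modify a PySem.Set.empty (fun s => PySem.Set.add s n)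

-- A's whole loop body at one qualifying pair
def stepA (st : PySem.Dict Int (PySem.Set Int) × PySem.Dict Int (List Int) × Int) (p : Int × Int) :
    PySem.Dict Int (PySem.Set Int) × PySem.Dict Int (List Int) × Int :=
  (vstepA st.2.2 p.2 (vstepA st.2.2 p.1 st.1), st.2.1.insert st.2.2 [p.1, p.2], st.2.2 + 1)

-- the qualifying pairs of the whole matrix, row-major
def pairsOf (graph_matrix : List (List Int)) : List (Int × Int) :=
  graph_matrix.foldl (fun pairs row =>
    let first := PySem.List.pyGetD row 0 0
    pairs ++ ((PySem.List.slice row (some 1) none).filter (fun x => x > first)).map (fun x => (first, x)))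
    ([] : List (Int × Int))

-- the same pairs, row by row, through A's index loop
def idxPairs (row : List Int) : List (Int × Int) :=
  ((PySem.List.pyRange 1 (PySem.List.len row) 1).filter
      (fun i => PySem.List.pyGetD row i 0 > PySem.List.pyGetD row 0 0)).map
    (fun i => (PySem.List.pyGetD row 0 0, PySem.List.pyGetD row i 0))

-- an edge item of B from a numbered pair
def toItem (np : Int × Int × Int) : Int × List Int := (np.1, [np.2.1, np.2.2])

lemma pairsOf_eq_flatMap (graph_matrix : List (List Int)) :
    pairsOf graph_matrix = graph_matrix.flatMap idxPairs := by
  unfold pairsOf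
  show graph_matrix.foldl (fun pairs row => pairs ++
      ((PySem.List.slice row (some 1) none).filter (fun x => decide (x > PySem.List.pyGetD row 0 0))).map
        (fun x => (PySem.List.pyGetD row 0 0, x))) [] = _
  rw [PySem.List.foldl_append_eq_flatMap]
  simp only [List.nil_append]
  congr 1
  funext row
  unfold idxPairs
  rw [PySem.List.slice_from row (by norm_num : (0:Int) ≤ 1)]
  rw [← PySem.List.map_pyGetD_pyRange row 0 (by norm_num : (0:Int) ≤ 1), List.filter_map, List.map_map]
  rfl

lemma insert_self_of_get? {κ ν : Type} [BEq κ] [LawfulBEq κ] (d : PySem.Dict κ ν) (k : κ) (v : ν)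
    (hg : d.get? k = some v) (hnd : d.keys.Nodup) : d.insert k v = d := by
  apply PySem.Dict.ext
  have hc : d.contains k = true := by
    rw [PySem.Dict.contains_eq_isSome_get?, hg]; rfl
  rw [PySem.Dict.items_insert_of_contains d v hc]
  have hmem : (k, v) ∈ d.items := PySem.Dict.mem_items_of_get?_eq_some d hg
  calc List.map (fun p => if (p.1 == k) = true then (k, v) else p) d.items
      = List.map id d.items := by
        apply List.map_congr_left
        intro p hp
        by_cases hpk : p.1 = k
        · have hnd' : (d.items.map (fun p => p.1)).Nodup := hnd
          have hp' : p = (k, v) := List.inj_on_of_nodup_map hnd' hp hmem (by simp [hpk])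
          simp [hp']
        · simp [hpk]
    _ = d.items := List.map_id d.items

lemma vstep_eq (v : PySem.Dict Int (PySem.Set Int)) (hnd : v.keys.Nodup) (n a : Int) :
    vstepA n a v = vstepB n a v := by
  unfold vstepA vstepB
  cases hg : v.get? a with
  | none =>
    have hc : v.contains a = false := by rw [PySem.Dict.contains_eq_isSome_get?, hg]; rfl
    rw [PySem.Dict.setdefault_of_not_contains v PySem.Set.empty hc]
    simp only [Option.getD_none, if_pos]
  | some s =>
    have hc : v.contains a = true := by rw [PySem.Dict.contains_eq_isSome_get?, hg]; rfl
    rw [PySem.Dict.setdefault_of_contains v PySem.Set.empty hc]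
    simp only [Option.getD_some]
    by_cases hs : s = PySem.Set.empty
    · rw [if_pos hs, insert_self_of_get? v a PySem.Set.empty (hs ▸ hg) hnd]
    · rw [if_neg hs]

lemma vstepB_nodup (v : PySem.Dict Int (PySem.Set Int)) (hnd : v.keys.Nodup) (n a : Int) :
    (vstepB n a v).keys.Nodup := by
  unfold vstepB
  have h1 : (v.setdefault a PySem.Set.empty).keys.Nodup := by
    rw [PySem.Dict.keys_setdefault]
    by_cases hc : v.contains a = true
    · simp [hc, hnd]
    · have hmem : a ∉ v.keys := fun hm => hc ((PySem.Dict.contains_iff_mem_keys v a).mpr hm)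
      simp only [hc, if_false, Bool.false_eq_true, List.nodup_append, List.nodup_singleton]
      refine ⟨hnd, trivial, ?_⟩
      intro x hx y hy hxy
      rw [List.mem_singleton] at hy
      subst hy; subst hxy
      exact hmem hx
  rw [PySem.Dict.keys_modify]
  exact PySem.Dict.nodup_keys_insert _ _ _ h1

lemma foldl_stepA_split (pairs : List (Int × Int)) :
    ∀ (v : PySem.Dict Int (PySem.Set Int)) (e : PySem.Dict Int (List Int)) (n : Int),
      v.keys.Nodup →
      pairs.foldl stepA (v, e, n) =
      ((PySem.List.enumerate pairs n).foldl
          (fun v np => vstepB np.1 np.2.2 (vstepB np.1 np.2.1 v)) v,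
       (PySem.List.enumerate pairs n).foldl
          (fun d np => d.insert np.1 [np.2.1, np.2.2]) e,
       n + pairs.length) := by
  induction pairs with
  | nil => intro v e n _; simp [PySem.List.enumerate_nil]
  | cons p t ih =>
    intro v e n h
    rw [PySem.List.enumerate_cons]
    simp only [List.foldl_cons]
    have h1 : (vstepB n p.1 v).keys.Nodup := vstepB_nodup _ h _ _
    have h2 : (vstepB n p.2 (vstepB n p.1 v)).keys.Nodup := vstepB_nodup _ h1 _ _
    have hstep : stepA (v, e, n) p = (vstepB n p.2 (vstepB n p.1 v), e.insert n [p.1, p.2], n + 1) := by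
      simp [stepA, vstep_eq v h, vstep_eq _ h1]
    rw [hstep, ih _ _ _ h2]
    have hlen : (n + 1) + (t.length : Int) = n + ((p :: t).length : Int) := by
      push_cast [List.length_cons]; ring
    rw [hlen]

lemma A_fold_eq (graph_matrix : List (List Int))
    (st : PySem.Dict Int (PySem.Set Int) × PySem.Dict Int (List Int) × Int) :
    graph_matrix.foldl (fun st inp =>
      let vertex := PySem.List.pyGetD inp 0 0
      (PySem.List.pyRange 1 (PySem.List.len inp) 1).foldl (fun st i =>
        let second_vertex := PySem.List.pyGetD inp i 0
        if second_vertex > vertex then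
          let n := st.2.2
          let es := (st.2.1).insert n [vertex, second_vertex]
          let vs := st.1
          let vs := if (vs.get? vertex).getD PySem.Set.empty = PySem.Set.empty then vs.insert vertex PySem.Set.empty else vs
          let vs := vs.modify vertex PySem.Set.empty (fun s => PySem.Set.add s n)
          let vs := if (vs.get? second_vertex).getD PySem.Set.empty = PySem.Set.empty then vs.insert second_vertex PySem.Set.empty else vs
          let vs := vs.modify second_vertex PySem.Set.empty (fun s => PySem.Set.add s n)
          (vs, es, n + 1)
        else st) st) st
    = (graph_matrix.flatMap idxPairs).foldl stepA st := by
  rw [List.foldl_flatMap]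
  apply List.foldl_ext
  intro st row _
  rw [idxPairs, List.foldl_map, List.foldl_filter]
  apply List.foldl_ext
  intro st i _
  by_cases hq : PySem.List.pyGetD row i 0 > PySem.List.pyGetD row 0 0
  · simp only [hq, if_pos, decide_eq_true_eq, stepA, vstepA]
  · simp [hq]

-- enumerate of a mapped list
lemma enumerate_map {α β : Type} (f : α → β) (xs : List α) :
    ∀ s : Int, PySem.List.enumerate (xs.map f) s
      = (PySem.List.enumerate xs s).map (fun p => (p.1, f p.2)) := by
  induction xs with
  | nil => intro s; simp [PySem.List.enumerate_nil]
  | cons x t ih => intro s; simp [PySem.List.enumerate_cons, ih]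

-- B's items loop produces exactly the enumerated pairs of pairsOf, as edge items
lemma B_items_eq (graph_matrix : List (List Int)) :
    ∀ (pre : List (Int × Int)),
      graph_matrix.foldl (fun (ib : List (Int × List Int) × Int) row =>
          let v := PySem.List.pyGetD row 0 0
          let hits := (PySem.List.slice row (some 1) none).filter (fun x => x > v)
          (ib.1 ++ (PySem.List.enumerate hits ib.2).map (fun nw => (nw.1, [v, nw.2])),
           ib.2 + (hits.length : Int)))
        ((PySem.List.enumerate pre 1).map toItem, 1 + (pre.length : Int))
      = ((PySem.List.enumerate (graph_matrix.foldl (fun pairs row =>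
            let first := PySem.List.pyGetD row 0 0
            pairs ++ ((PySem.List.slice row (some 1) none).filter (fun x => x > first)).map
              (fun x => (first, x))) pre) 1).map toItem,
         1 + ((graph_matrix.foldl (fun pairs row =>
            let first := PySem.List.pyGetD row 0 0
            pairs ++ ((PySem.List.slice row (some 1) none).filter (fun x => x > first)).map
              (fun x => (first, x))) pre).length : Int)) := by
  induction graph_matrix with
  | nil => intro pre; rfl
  | cons row t ih =>
    intro pre
    simp only [List.foldl_cons]
    have hstep :
        ((PySem.List.enumerate pre 1).map toItem ++
          (PySem.List.enumerate ((PySem.List.slice row (some 1) none).filter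
              (fun x => x > PySem.List.pyGetD row 0 0)) (1 + (pre.length : Int))).map
            (fun nw => (nw.1, [PySem.List.pyGetD row 0 0, nw.2])),
         (1 + (pre.length : Int)) + (((PySem.List.slice row (some 1) none).filter
              (fun x => x > PySem.List.pyGetD row 0 0)).length : Int))
        = ((PySem.List.enumerate (pre ++ ((PySem.List.slice row (some 1) none).filter
              (fun x => x > PySem.List.pyGetD row 0 0)).map
                (fun x => (PySem.List.pyGetD row 0 0, x))) 1).map toItem,
           1 + ((pre ++ ((PySem.List.slice row (some 1) none).filter
              (fun x => x > PySem.List.pyGetD row 0 0)).map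
                (fun x => (PySem.List.pyGetD row 0 0, x))).length : Int)) := by
      rw [PySem.List.enumerate_append, enumerate_map, List.map_append, List.map_map]
      refine Prod.ext rfl ?_
      simp only [List.length_append, List.length_map]
      push_cast
      ring
    have := ih (pre ++ ((PySem.List.slice row (some 1) none).filter
        (fun x => x > PySem.List.pyGetD row 0 0)).map (fun x => (PySem.List.pyGetD row 0 0, x)))
    rw [← hstep] at this
    exact this

-- one setdefault+add step on a dict whose items are a keyed table
lemma modify_eq_insert (d : PySem.Dict Int (PySem.Set Int)) (k : Int) (d0 : PySem.Set Int)
    (f : PySem.Set Int → PySem.Set Int) : d.modify k d0 f = d.insert k (f (d.getD k d0)) := rfl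

lemma vstepB_items (d : PySem.Dict Int (PySem.Set Int)) (K : List Int) (V : Int → PySem.Set Int)
    (hK : K.Nodup) (hitems : d.items = K.map (fun u => (u, V u)))
    (hV : ∀ u, u ∉ K → V u = PySem.Set.empty) (n a : Int) :
    (vstepB n a d).items = (PySem.Set.add K a).map
      (fun u => (u, if u = a then PySem.Set.add (V u) n else V u)) := by
  have hkeys : d.keys = K := by
    show d.items.map (fun p => p.1) = K
    rw [hitems, List.map_map]
    exact List.map_id K
  have hknd : d.keys.Nodup := by rw [hkeys]; exact hK
  unfold vstepB
  rw [modify_eq_insert]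
  by_cases ha : a ∈ K
  · have hc : d.contains a = true := by
      rw [PySem.Dict.contains_iff_mem_keys, hkeys]; exact ha
    rw [PySem.Dict.setdefault_of_contains _ _ hc]
    have hgd : d.getD a PySem.Set.empty = V a := by
      refine PySem.Dict.getD_of_mem_items d ?_ hknd PySem.Set.empty
      rw [hitems]
      exact List.mem_map_of_mem ha
    rw [hgd, PySem.Dict.items_insert_of_contains d _ hc, hitems, List.map_map,
        PySem.Set.add_of_mem ha]
    apply List.map_congr_left
    intro u _
    by_cases h : u = a
    · subst h; simp
    · simp [h]
  · have hc : d.contains a = false := by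
      rw [← Bool.not_eq_true, PySem.Dict.contains_iff_mem_keys, hkeys]; exact ha
    rw [PySem.Dict.setdefault_of_not_contains _ _ hc]
    have hc2 : (d.insert a PySem.Set.empty).contains a = true :=
      PySem.Dict.contains_insert_self d a PySem.Set.empty
    rw [PySem.Dict.getD_insert_self, PySem.Dict.items_insert_of_contains _ _ hc2,
        PySem.Dict.items_insert_of_not_contains d _ hc, hitems,
        PySem.Set.add_of_not_mem ha, List.map_append, List.map_map, List.map_append]
    congr 1
    · apply List.map_congr_left
      intro u hu
      have h : u ≠ a := fun he => ha (he ▸ hu)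
      simp [h]
    · simp [hV a ha]

-- the grouping loop, characterised: keys in first-occurrence order, each mapped to its numbers
lemma group_items (l : List (Int × Int × Int)) :
    (l.foldl (fun v np => vstepB np.1 np.2.2 (vstepB np.1 np.2.1 v)) PySem.Dict.empty).items
    = (PySem.Set.ofList (l.flatMap (fun np => [np.2.1, np.2.2]))).map
        (fun u => (u, PySem.Set.ofList ((l.filter
            (fun np => np.2.1 == u || np.2.2 == u)).map (fun np => np.1)))) := by
  induction l using List.reverseRecOn with
  | nil => rfl
  | append_singleton t np ih =>
    rw [List.foldl_append]
    simp only [List.foldl_cons, List.foldl_nil]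
    have hK : (PySem.Set.ofList (t.flatMap (fun np => [np.2.1, np.2.2]))).Nodup :=
      PySem.Set.nodup_ofList _
    have hV : ∀ u, u ∉ PySem.Set.ofList (t.flatMap (fun np => [np.2.1, np.2.2])) →
        PySem.Set.ofList ((t.filter
          (fun np => np.2.1 == u || np.2.2 == u)).map (fun np => np.1)) = PySem.Set.empty := by
      intro u hu
      have hnil : t.filter (fun np => np.2.1 == u || np.2.2 == u) = [] := by
        rw [List.filter_eq_nil_iff]
        intro q hmem hq
        apply hu
        rw [PySem.Set.mem_ofList, List.mem_flatMap]
        refine ⟨q, hmem, ?_⟩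
        rw [Bool.or_eq_true] at hq
        rcases hq with h | h
        · exact (beq_iff_eq.mp h) ▸ List.mem_cons_self
        · exact (beq_iff_eq.mp h) ▸ List.mem_cons_of_mem _ List.mem_cons_self
      rw [hnil]
      rfl
    have h1 := vstepB_items _ _ _ hK ih hV np.1 np.2.1
    have hK1 : (PySem.Set.add (PySem.Set.ofList (t.flatMap (fun np => [np.2.1, np.2.2]))) np.2.1).Nodup :=
      PySem.Set.nodup_add _ _ hK
    have hV1 : ∀ u, u ∉ PySem.Set.add (PySem.Set.ofList (t.flatMap (fun np => [np.2.1, np.2.2]))) np.2.1 →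
        (if u = np.2.1
          then PySem.Set.add (PySem.Set.ofList ((t.filter
            (fun np => np.2.1 == u || np.2.2 == u)).map (fun np => np.1))) np.1
          else PySem.Set.ofList ((t.filter
            (fun np => np.2.1 == u || np.2.2 == u)).map (fun np => np.1))) = PySem.Set.empty := by
      intro u hu
      rw [PySem.Set.mem_add] at hu
      rw [if_neg (fun h => hu (Or.inr h)), hV u (fun h => hu (Or.inl h))]
    have h2 := vstepB_items _ _ _ hK1 h1 hV1 np.1 np.2.2
    rw [h2]
    -- the key lists agree
    have hkeys : PySem.Set.add (PySem.Set.add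
        (PySem.Set.ofList (t.flatMap (fun np => [np.2.1, np.2.2]))) np.2.1) np.2.2
        = PySem.Set.ofList ((t ++ [np]).flatMap (fun np => [np.2.1, np.2.2])) := by
      rw [List.flatMap_append, PySem.Set.ofList_append]
      simp only [List.flatMap_cons, List.flatMap_nil, List.append_nil]
      rw [PySem.Set.update_cons, PySem.Set.update_cons, PySem.Set.update_nil]
    rw [← hkeys]
    apply List.map_congr_left
    intro u _
    have hfil : (t ++ [np]).filter (fun q => q.2.1 == u || q.2.2 == u)
        = t.filter (fun q => q.2.1 == u || q.2.2 == u)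
          ++ (if np.2.1 == u || np.2.2 == u then [np] else []) := by
      rw [List.filter_append, List.filter_singleton, Bool.cond_eq_ite]
    rw [hfil]
    by_cases h1a : u = np.2.1
    · by_cases h2b : u = np.2.2
      · -- u is both endpoints: one add absorbs the other
        rw [if_pos h2b, if_pos h1a]
        have hq : (np.2.1 == u || np.2.2 == u) = true := by simp [← h1a]
        simp only [hq, if_true, List.map_append, List.map_cons, List.map_nil,
          PySem.Set.ofList_append, PySem.Set.update_cons, PySem.Set.update_nil]
        rw [PySem.Set.add_of_mem (by rw [PySem.Set.mem_add]; exact Or.inr rfl)]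
      · rw [if_neg h2b, if_pos h1a]
        have hq : (np.2.1 == u || np.2.2 == u) = true := by simp [← h1a]
        simp only [hq, if_true, List.map_append, List.map_cons, List.map_nil,
          PySem.Set.ofList_append, PySem.Set.update_cons, PySem.Set.update_nil]
    · by_cases h2b : u = np.2.2
      · rw [if_pos h2b, if_neg h1a]
        have hq : (np.2.1 == u || np.2.2 == u) = true := by simp [← h2b]
        simp only [hq, if_true, List.map_append, List.map_cons, List.map_nil,
          PySem.Set.ofList_append, PySem.Set.update_cons, PySem.Set.update_nil]
      · rw [if_neg h2b, if_neg h1a]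
        have hq : (np.2.1 == u || np.2.2 == u) = false := by
          simp only [Bool.or_eq_false_iff, beq_eq_false_iff_ne, ne_eq]
          exact ⟨fun h => h1a h.symm, fun h => h2b h.symm⟩
        simp [hq]

-- B's vertices loop inserts each first-occurrence vertex once, a fresh distinct key each time
lemma B_vertices_items (items : List (Int × List Int)) :
    ((PySem.List.dedup (items.flatMap (fun p => p.2))).foldl
        (fun (d : PySem.Dict Int (PySem.Set Int)) v =>
          d.insert v (PySem.Set.ofList ((items.filter (fun p => decide (v ∈ p.2))).map (fun p => p.1))))
        PySem.Dict.empty).items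
    = (PySem.List.dedup (items.flatMap (fun p => p.2))).map
        (fun v => (v, PySem.Set.ofList ((items.filter
            (fun p => decide (v ∈ p.2))).map (fun p => p.1)))) := by
  have h := PySem.Dict.items_foldl_insert_fresh
    (l := PySem.List.dedup (items.flatMap (fun p => p.2)))
    (k := fun v => v)
    (v := fun v => PySem.Set.ofList ((items.filter (fun p => decide (v ∈ p.2))).map (fun p => p.1)))
    (d := PySem.Dict.empty)
    (by intro a _; exact PySem.Dict.contains_empty a)
    (by rw [List.map_id']
        rw [PySem.List.dedup_eq_ofList]
        exact PySem.Set.nodup_ofList _)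
  rw [h]
  rfl

-- the two membership tests used by A's grouping and B's comprehension agree
lemma pred_eq (v : Int) (np : Int × Int × Int) :
    decide (v ∈ (toItem np).2) = (np.2.1 == v || np.2.2 == v) := by
  unfold toItem
  by_cases h1 : v = np.2.1
  · simp [h1]
  · by_cases h2 : v = np.2.2
    · simp [h2, eq_comm]
    · rw [decide_eq_false (by simp [h1, h2])]
      symm
      rw [Bool.or_eq_false_iff]
      constructor <;> rw [beq_eq_false_iff_ne]
      · exact fun h => h1 h.symm
      · exact fun h => h2 h.symm

-- the two dict-building passes of B, on the mapped items, equal A's loops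
lemma vertices_eq (l : List (Int × Int × Int)) :
    ((PySem.List.dedup ((l.map toItem).flatMap (fun p => p.2))).foldl
        (fun (d : PySem.Dict Int (PySem.Set Int)) v =>
          d.insert v (PySem.Set.ofList (((l.map toItem).filter
            (fun p => decide (v ∈ p.2))).map (fun p => p.1))))
        PySem.Dict.empty).items
    = (l.foldl (fun v np => vstepB np.1 np.2.2 (vstepB np.1 np.2.1 v)) PySem.Dict.empty).items := by
  rw [B_vertices_items (l.map toItem), group_items l]
  have hflat : (l.map toItem).flatMap (fun p => p.2) = l.flatMap (fun np => [np.2.1, np.2.2]) := by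
    rw [List.flatMap_map]
    rfl
  rw [PySem.List.dedup_eq_ofList, hflat]
  apply List.map_congr_left
  intro v _
  have hfil : ((l.map toItem).filter (fun p => decide (v ∈ p.2))).map (fun p => p.1)
      = (l.filter (fun np => np.2.1 == v || np.2.2 == v)).map (fun np => np.1) := by
    rw [List.filter_map, List.map_map]
    exact congrArg _ (List.filter_congr (fun np _ => pred_eq v np))
  rw [hfil]

lemma edges_eq (l : List (Int × Int × Int)) :
    (l.map toItem).foldl (fun (d : PySem.Dict Int (List Int)) p => d.insert p.1 p.2)
        PySem.Dict.empty
    = l.foldl (fun d np => d.insert np.1 [np.2.1, np.2.2]) PySem.Dict.empty := by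
  rw [List.foldl_map]
  rfl

-- ===== VERDICT (by name: the statement is the Claim_ definition above) =====
theorem process_graph_matrix_spec : Claim_equal_process_graph_matrix := by
  intro gm _ _
  unfold Spec_process_graph_matrix
  have hB := B_items_eq gm []
  simp only [PySem.List.enumerate_nil, List.map_nil, List.length_nil, Nat.cast_zero,
    add_zero] at hB
  have hB1 : (gm.foldl (fun (ib : List (Int × List Int) × Int) row =>
      let v := PySem.List.pyGetD row 0 0
      let hits := (PySem.List.slice row (some 1) none).filter (fun x => x > v)
      (ib.1 ++ (PySem.List.enumerate hits ib.2).map (fun nw => (nw.1, [v, nw.2])),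
       ib.2 + (hits.length : Int))) ([], 1)).1
      = (PySem.List.enumerate (pairsOf gm) 1).map toItem := by
    rw [hB]
    rfl
  have halt : process_graph_matrix_alt gm =
      (((PySem.List.dedup (((gm.foldl (fun (ib : List (Int × List Int) × Int) row =>
            let v := PySem.List.pyGetD row 0 0
            let hits := (PySem.List.slice row (some 1) none).filter (fun x => x > v)
            (ib.1 ++ (PySem.List.enumerate hits ib.2).map (fun nw => (nw.1, [v, nw.2])),
             ib.2 + (hits.length : Int))) ([], 1)).1).flatMap (fun p => p.2))).foldl
          (fun (d : PySem.Dict Int (PySem.Set Int)) v =>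
            d.insert v (PySem.Set.ofList ((((gm.foldl (fun (ib : List (Int × List Int) × Int) row =>
                let v := PySem.List.pyGetD row 0 0
                let hits := (PySem.List.slice row (some 1) none).filter (fun x => x > v)
                (ib.1 ++ (PySem.List.enumerate hits ib.2).map (fun nw => (nw.1, [v, nw.2])),
                 ib.2 + (hits.length : Int))) ([], 1)).1).filter
                  (fun p => decide (v ∈ p.2))).map (fun p => p.1))))
          PySem.Dict.empty).items,
       (((gm.foldl (fun (ib : List (Int × List Int) × Int) row =>
            let v := PySem.List.pyGetD row 0 0
            let hits := (PySem.List.slice row (some 1) none).filter (fun x => x > v)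
            (ib.1 ++ (PySem.List.enumerate hits ib.2).map (fun nw => (nw.1, [v, nw.2])),
             ib.2 + (hits.length : Int))) ([], 1)).1).foldl
          (fun (d : PySem.Dict Int (List Int)) p => d.insert p.1 p.2)
          PySem.Dict.empty).items) := rfl
  rw [halt, hB1, vertices_eq, edges_eq]
  unfold process_graph_matrix
  rw [A_fold_eq gm, ← pairsOf_eq_flatMap gm,
    foldl_stepA_split (pairsOf gm) PySem.Dict.empty PySem.Dict.empty 1 PySem.Dict.nodup_keys_empty]
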